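-- pv_equiv track=rewrite | github.com/Xin-tong-Jiang/Oil-Wells-Data-Wrangling | pdf_to_db.py | commas_outside_quotes
-- ===== SOURCE A (Python) =====
-- def commas_outside_quotes(s: str) -> int:
--     """统计行中引号外的逗号数，用来判断一条记录是否完整。"""
--     cnt, inq = 0, False
--     for ch in s:
--         if ch == '"':
--             inq = not inq
--         elif ch == ',' and not inq:
--             cnt += 1
--     return cnt
-- ===== SOURCE B (Python) =====
-- def commas_outside_quotes(s: str) -> int:
--     # Split on the double-quote character: even-indexed segments are exactly the outside-quote regions.
--     return sum(part.count(',') for i, part in enumerate(s.split('"')) if i % 2 == 0)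
-- ===== Notes on version B (the rewrite author's own statement) =====
-- stated objective: idiomatic
-- what changed: Replaces the per-character in-quote state machine with a split-on-double-quote pass that sums comma counts of the even-indexed (outside-quote) segments.
import Mathlib
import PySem

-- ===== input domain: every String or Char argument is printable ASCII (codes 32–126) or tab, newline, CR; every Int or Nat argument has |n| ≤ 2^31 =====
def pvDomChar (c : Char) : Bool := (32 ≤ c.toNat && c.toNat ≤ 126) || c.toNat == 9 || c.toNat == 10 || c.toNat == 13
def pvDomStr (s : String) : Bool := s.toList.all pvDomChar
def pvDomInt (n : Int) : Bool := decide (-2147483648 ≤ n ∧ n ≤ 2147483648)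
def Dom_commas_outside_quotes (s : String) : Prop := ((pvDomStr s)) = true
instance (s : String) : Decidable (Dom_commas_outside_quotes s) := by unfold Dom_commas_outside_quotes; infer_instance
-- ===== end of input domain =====

-- B replaces A's per-character in-quote state machine by splitting on the double-quote character and
-- summing the comma counts of the even-indexed (outside-quote) segments (idiomatic).


-- ===== PORT A =====
-- for ch in s: flip inq on '"', count ',' outside quotes
def commas_outside_quotes (s : String) : Int :=
  (s.toList.foldl
    (fun (st : Int × Bool) ch =>
      if ch == '"' then (st.1, !st.2)
      else if ch == ',' && !st.2 then (st.1 + 1, st.2)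
      else st)
    ((0 : Int), false)).1

-- ===== PORT B =====
-- s.split('"') with a nonempty separator is PySem.Chars.splitOn on the code points;
-- sum(part.count(',') for i, part in enumerate(...) if i % 2 == 0) = filter + map + sum.
def commas_outside_quotes_alt (s : String) : Int :=
  ((((PySem.List.enumerate (PySem.Chars.splitOn s.toList ['"'])).filter
      (fun ip => ip.1 % 2 == 0)).map
      (fun ip => (PySem.Chars.count ip.2 [','] : Int))).sum)

-- ===== PRECONDITION & SPEC =====
def Spec_commas_outside_quotes (s : String) (out : Int) : Prop := out = commas_outside_quotes_alt s
instance (s : String) (out : Int) : Decidable (Spec_commas_outside_quotes s out) := by unfold Spec_commas_outside_quotes; infer_instance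

-- ===== CLAIM (what is proved, stated in full; the proofs are below) =====
def Claim_equal_commas_outside_quotes : Prop := ∀ (s : String), Dom_commas_outside_quotes s → Spec_commas_outside_quotes s (commas_outside_quotes s)

-- ===== LEMMAS AND PROOFS =====

-- Reference splitter: split a char list on '"'.
def pvSQ : List Char → List (List Char)
  | [] => [[]]
  | c :: rest =>
    if c = '"' then [] :: pvSQ rest
    else match pvSQ rest with
      | [] => [[c]]
      | p :: ps => (c :: p) :: ps

-- Alternating comma sum: count commas of every segment at an even position (flag true).
def pvAltSum : Bool → List (List Char) → Int
  | _, [] => 0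
  | b, p :: ps => (if b then (p.count ',' : Int) else 0) + pvAltSum (!b) ps

theorem pvSQ_ne_nil (l : List Char) : pvSQ l ≠ [] := by
  cases l with
  | nil => simp [pvSQ]
  | cons c rest =>
    simp only [pvSQ]
    split
    · simp
    · split <;> simp

theorem pv_count_go (fuel : Nat) (l : List Char) (acc : Nat) (h : l.length ≤ fuel) :
    PySem.Chars.count.go [','] fuel l acc = acc + l.count ',' := by
  induction fuel generalizing l acc with
  | zero =>
    interval_cases hl : l.length
    rw [List.length_eq_zero_iff] at hl
    subst hl
    simp [PySem.Chars.count.go]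
  | succ fuel ih =>
    cases l with
    | nil => simp [PySem.Chars.count.go]
    | cons c t =>
      simp only [PySem.Chars.count.go]
      by_cases hc : c = ','
      · subst hc
        rw [if_pos (by simp [List.isPrefixOf])]
        simp only [List.length_cons] at h
        rw [ih _ _ (by simpa using h)]
        simp [List.count_cons]
        omega
      · rw [if_neg (by simp [List.isPrefixOf]; exact fun h => hc h.symm)]
        simp only [List.length_cons] at h
        rw [ih _ _ (by omega)]
        simp [List.count_cons, hc]

theorem pv_count_comma (l : List Char) : PySem.Chars.count l [','] = l.count ',' := by
  simp [PySem.Chars.count, pv_count_go l.length l 0 le_rfl]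

-- Prepend pre to the head segment.
def pvConsHead (pre : List Char) : List (List Char) → List (List Char)
  | [] => [pre]
  | p :: ps => (pre ++ p) :: ps

theorem pv_split_go (fuel : Nat) (l cur : List Char) (acc : List (List Char))
    (h : l.length < fuel) :
    PySem.Chars.splitOn.go ['"'] fuel l cur acc =
      acc.reverse ++ pvConsHead cur.reverse (pvSQ l) := by
  induction fuel generalizing l cur acc with
  | zero => omega
  | succ fuel ih =>
    cases l with
    | nil => simp [PySem.Chars.splitOn.go, pvSQ, pvConsHead]
    | cons c rest =>
      simp only [PySem.Chars.splitOn.go]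
      by_cases hc : c = '"'
      · subst hc
        rw [if_pos (by simp [List.isPrefixOf])]
        simp only [List.length_cons] at h
        rw [List.length_singleton, List.drop_one, List.tail_cons,
          ih rest [] _ (by omega)]
        have := pvSQ_ne_nil rest
        cases hq : pvSQ rest with
        | nil => exact absurd hq this
        | cons p ps => simp [pvSQ, hq, pvConsHead]
      · rw [if_neg (by simp [List.isPrefixOf]; exact fun h => hc h.symm)]
        simp only [List.length_cons] at h
        rw [ih rest (c :: cur) acc (by omega)]
        have := pvSQ_ne_nil rest
        cases hq : pvSQ rest with
        | nil => exact absurd hq this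
        | cons p ps => simp [pvSQ, hq, hc, pvConsHead]

theorem pv_splitOn_eq (l : List Char) : PySem.Chars.splitOn l ['"'] = pvSQ l := by
  rw [PySem.Chars.splitOn, pv_split_go (l.length + 1) l [] [] (by omega)]
  have := pvSQ_ne_nil l
  cases hq : pvSQ l with
  | nil => exact absurd hq this
  | cons p ps => simp [pvConsHead]

-- A's fold computes the alternating comma sum over the '"'-split segments.
theorem pv_foldA (l : List Char) (cnt : Int) (inq : Bool) :
    (l.foldl
      (fun (st : Int × Bool) ch =>
        if ch == '"' then (st.1, !st.2)
        else if ch == ',' && !st.2 then (st.1 + 1, st.2)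
        else st)
      (cnt, inq)).1 = cnt + pvAltSum (!inq) (pvSQ l) := by
  induction l generalizing cnt inq with
  | nil => cases inq <;> simp [pvSQ, pvAltSum]
  | cons c rest ih =>
    by_cases hc : c = '"'
    · subst hc
      simp only [List.foldl_cons, if_pos (by simp : ('"' == '"') = true)]
      rw [ih]
      simp [pvSQ, pvAltSum]
    · have hq : pvSQ rest ≠ [] := pvSQ_ne_nil rest
      cases hsq : pvSQ rest with
      | nil => exact absurd hsq hq
      | cons p ps =>
        simp only [List.foldl_cons]
        rw [if_neg (by simp [hc])]
        by_cases hcm : c = ',' ∧ inq = false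
        · obtain ⟨hcm, hin⟩ := hcm
          subst hcm; subst hin
          rw [if_pos (by simp)]
          rw [ih]
          simp [pvSQ, hc, hsq, pvAltSum, List.count_cons]
          ring
        · rw [if_neg (by
            cases inq <;> simp_all)]
          rw [ih]
          cases inq with
          | false =>
            have hcm' : c ≠ ',' := fun h => hcm ⟨h, rfl⟩
            simp [pvSQ, hc, hsq, pvAltSum, List.count_cons, hcm']
          | true => simp [pvSQ, hc, hsq, pvAltSum]

-- B's filtered enumerate-sum is the same alternating sum (flag = parity of the start index).
theorem pv_enum_sum (parts : List (List Char)) (n : Int) :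
    (((PySem.List.enumerate parts n).filter (fun ip => ip.1 % 2 == 0)).map
      (fun ip => (PySem.Chars.count ip.2 [','] : Int))).sum
      = pvAltSum (n % 2 == 0) parts := by
  induction parts generalizing n with
  | nil => simp [PySem.List.enumerate, pvAltSum]
  | cons p ps ih =>
    rw [PySem.List.enumerate_cons]
    have hpar : (((n + 1) % 2 == 0) : Bool) = !(n % 2 == 0) := by
      rcases Int.emod_two_eq_zero_or_one n with h | h
      · have h1 : (n + 1) % 2 = 1 := by omega
        simp [h, h1]
      · have h1 : (n + 1) % 2 = 0 := by omega
        simp [h, h1]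
    by_cases hn : n % 2 = 0
    · rw [List.filter_cons_of_pos (by simp [hn]), List.map_cons, List.sum_cons,
        ih, hpar, pv_count_comma]
      simp [pvAltSum, hn]
    · rw [List.filter_cons_of_neg (by simp [hn]), ih, hpar]
      simp [pvAltSum, hn]

-- ===== VERDICT (by name: the statement is the Claim_ definition above) =====
theorem commas_outside_quotes_spec : Claim_equal_commas_outside_quotes := by
  intro s _
  unfold Spec_commas_outside_quotes commas_outside_quotes commas_outside_quotes_alt
  rw [pv_foldA, pv_splitOn_eq, pv_enum_sum]
  norm_num
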